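-- pv_equiv track=rewrite | github.com/nightjuggler/aoc | 2018/23.py | cramers_rule
-- ===== SOURCE A (Python) =====
-- def det(a, b, c, d, e, f, g, h, i):
-- 	# Determinant for a 3x3 matrix
-- 	# | a b c |
-- 	# | d e f |
-- 	# | g h i |
-- 	return a*(e*i - f*h) - b*(d*i - f*g) + c*(d*h - e*g)
--
-- def cramers_rule(coeffs):
-- 	m = []
-- 	n = []
-- 	for abc, d in coeffs.items():
-- 		m.extend(abc)
-- 		n.append(d)
-- 		if len(n) == 3: break
-- 	if len(n) != 3:
-- 		return None
-- 	D = det(*m)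
-- 	if not D:
-- 		return None
-- 	s = []
-- 	for i in range(3):
-- 		c = m[i::3]
-- 		m[i::3] = n
-- 		s.append(det(*m) // D)
-- 		m[i::3] = c
-- 	return s
-- ===== SOURCE B (Python) =====
-- def cramers_rule(coeffs):
-- 	rows = [(*abc, d) for abc, d in list(coeffs.items())[:3]]
-- 	if len(rows) != 3:
-- 		return None
-- 	(a, b, c, n0), (d, e, f, n1), (g, h, i, n2) = rows
-- 	D = a*(e*i - f*h) - b*(d*i - f*g) + c*(d*h - e*g)
-- 	if D == 0:
-- 		return None
-- 	# adjugate columns: s_j = (sum_i n_i * cofactor_ij) // D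
-- 	return [
-- 		(n0*(e*i - f*h) + n1*(c*h - b*i) + n2*(b*f - c*e)) // D,
-- 		(n0*(f*g - d*i) + n1*(a*i - c*g) + n2*(c*d - a*f)) // D,
-- 		(n0*(d*h - e*g) + n1*(b*g - a*h) + n2*(a*e - b*d)) // D,
-- 	]
-- ===== Notes on version B (the rewrite author's own statement) =====
-- stated objective: simpler
-- what changed: Replaces A's mutating loop that splices n into each matrix column (slice assignment, det recomputation, slice restore) by a closed-form adjugate: the nine signed cofactors are written out once and each solution component is one floor division of a cofactor dot product.
import Mathlib
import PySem

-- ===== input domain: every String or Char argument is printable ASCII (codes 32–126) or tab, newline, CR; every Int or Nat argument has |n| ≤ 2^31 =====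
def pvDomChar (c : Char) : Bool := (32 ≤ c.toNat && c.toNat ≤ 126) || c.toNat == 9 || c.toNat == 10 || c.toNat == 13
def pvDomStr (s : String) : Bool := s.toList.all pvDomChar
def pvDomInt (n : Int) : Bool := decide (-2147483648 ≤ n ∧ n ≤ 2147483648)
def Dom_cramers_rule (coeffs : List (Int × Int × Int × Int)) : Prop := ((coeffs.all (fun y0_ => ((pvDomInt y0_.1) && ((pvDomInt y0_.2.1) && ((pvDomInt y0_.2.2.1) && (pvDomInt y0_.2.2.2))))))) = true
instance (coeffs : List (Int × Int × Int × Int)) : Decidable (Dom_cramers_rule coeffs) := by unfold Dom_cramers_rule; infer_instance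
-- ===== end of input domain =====

-- B replaces A's column-splicing loop by a closed-form adjugate (cofactor dot products); simpler, same O(1) cost.


-- ===== PORT A =====
-- det(a,…,i): determinant of the 3x3 matrix, as in A
def pyDet (a b c d e f g h i : Int) : Int :=
  a*(e*i - f*h) - b*(d*i - f*g) + c*(d*h - e*g)

-- det(*m): A always calls it with len(m) == 9; the catch-all branch is unreachable there
def pyDetL (m : List Int) : Int :=
  match m with
  | [a, b, c, d, e, f, g, h, i] => pyDet a b c d e f g h i
  | _ => 0

-- m[i::3] for the 9-element m (exact extended-slice read for 0 ≤ i < 3, len m = 9)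
def pyGetStep3 (m : List Int) (i : Nat) : List Int :=
  (List.range 3).filterMap fun k => m[i + 3*k]?

-- m[i::3] = n (exact extended-slice assignment when len n = len m[i::3], as in A);
-- positionally: element j is replaced by n[(j-i)/3] when j ∈ {i, i+3, i+6}
def pySetStep3Go : List Int → Nat → Nat → List Int → List Int
  | [], _, _, _ => []
  | x :: xs, j, i, n =>
      (if i ≤ j ∧ (j - i) % 3 = 0 then n.getD ((j - i) / 3) x else x) :: pySetStep3Go xs (j + 1) i n
def pySetStep3 (m : List Int) (i : Nat) (n : List Int) : List Int := pySetStep3Go m 0 i n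

-- A's first loop: m.extend(abc); n.append(d); break when len(n) == 3
def pyBuildMN : List (Int × Int × Int × Int) → List Int → List Int → List Int × List Int
  | [], m, n => (m, n)
  | (a, b, c, d) :: rest, m, n =>
      let m := m ++ [a, b, c]
      let n := n ++ [d]
      if n.length = 3 then (m, n) else pyBuildMN rest m n

def cramers_rule (coeffs : List (Int × Int × Int × Int)) : Option (List Int) :=
  let mn := pyBuildMN coeffs [] []
  let m := mn.1
  let n := mn.2
  if n.length ≠ 3 then none
  else
    let D := pyDetL m
    if D = 0 then none
    else
      -- for i in range(3): save slice, splice n in, append det//D, restore (restore = keep m)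
      some ((List.range 3).foldl (fun s i =>
        let _c := pyGetStep3 m i
        let m' := pySetStep3 m i n
        s ++ [PySem.Int.floordiv (pyDetL m') D]) [])

-- ===== PORT B =====
def cramers_rule_alt (coeffs : List (Int × Int × Int × Int)) : Option (List Int) :=
  match coeffs.take 3 with
  | [(a, b, c, n0), (d, e, f, n1), (g, h, i, n2)] =>
      let D := a*(e*i - f*h) - b*(d*i - f*g) + c*(d*h - e*g)
      if D = 0 then none
      else
        -- adjugate columns: s_j = (sum_i n_i * cofactor_ij) // D
        some [
          PySem.Int.floordiv (n0*(e*i - f*h) + n1*(c*h - b*i) + n2*(b*f - c*e)) D,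
          PySem.Int.floordiv (n0*(f*g - d*i) + n1*(a*i - c*g) + n2*(c*d - a*f)) D,
          PySem.Int.floordiv (n0*(d*h - e*g) + n1*(b*g - a*h) + n2*(a*e - b*d)) D]
  | _ => none

-- ===== PRECONDITION & SPEC =====
def Spec_cramers_rule (coeffs : List (Int × Int × Int × Int)) (out : Option (List Int)) : Prop := out = cramers_rule_alt coeffs
instance (coeffs : List (Int × Int × Int × Int)) (out : Option (List Int)) : Decidable (Spec_cramers_rule coeffs out) := by unfold Spec_cramers_rule; infer_instance

-- ===== CLAIM (what is proved, stated in full; the proofs are below) =====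
def Claim_equal_cramers_rule : Prop := ∀ (coeffs : List (Int × Int × Int × Int)), Dom_cramers_rule coeffs → Spec_cramers_rule coeffs (cramers_rule coeffs)

-- ===== LEMMAS AND PROOFS =====

-- ===== VERDICT (by name: the statement is the Claim_ definition above) =====
theorem cramers_rule_spec : Claim_equal_cramers_rule := by
  intro coeffs _
  unfold Spec_cramers_rule
  obtain _ | ⟨⟨a,b,c,n0⟩, _ | ⟨⟨d,e,f,n1⟩, _ | ⟨⟨g,h,i,n2⟩, rest⟩⟩⟩ := coeffs
  · rfl
  · rfl
  · rfl
  · have h0 : pySetStep3Go [a,b,c,d,e,f,g,h,i] 0 0 [n0,n1,n2] = [n0,b,c,n1,e,f,n2,h,i] := by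
      norm_num [pySetStep3Go]
    have h1 : pySetStep3Go [a,b,c,d,e,f,g,h,i] 0 1 [n0,n1,n2] = [a,n0,c,d,n1,f,g,n2,i] := by
      norm_num [pySetStep3Go]
    have h2 : pySetStep3Go [a,b,c,d,e,f,g,h,i] 0 2 [n0,n1,n2] = [a,b,n0,d,e,n1,g,h,n2] := by
      norm_num [pySetStep3Go]
    simp only [cramers_rule, cramers_rule_alt, pyBuildMN, List.take, pySetStep3,
      List.range_succ, List.length, List.nil_append, List.cons_append]
    norm_num
    rw [h0, h1, h2]
    simp only [pyDetL, pyDet]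
    split_ifs with hD
    · rfl
    · simp only [Option.some.injEq, List.cons.injEq, and_true]
      refine ⟨?_, ?_, ?_⟩ <;> (congr 1; ring)
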